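-- pv_equiv track=rewrite | github.com/treebbb/cribserver | simulate_kitty.py | score_play_sequence2
-- ===== SOURCE A (Python) =====
-- def card_value(card):
--     return min(card[0], 10)
--
-- def score_play_sequence2(play_seq, is_dealer):
--     score = 0
--     total = 0
--     for i, card in enumerate(play_seq):
--         total += card_value(card)
--         # Check for 15 or 31
--         if total == 15:
--             score += 2
--         elif total == 31:
--             score += 2
--         # Check for pairs, triplets, etc.
--         if i >= 1 and card_value(card) == card_value(play_seq[i-1]):
--             score += 2
--             if i >= 2 and card_value(card) == card_value(play_seq[i-2]):
--                 score += 2  # Triplet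
--                 if i >= 3 and card_value(card) == card_value(play_seq[i-3]):
--                     score += 2  # Quad
--         # Check for runs
--         if i >= 2:
--             values = sorted([card_value(play_seq[j]) for j in range(i-2, i+1)])
--             if values[2] == values[1] + 1 == values[0] + 2:
--                 score += 3
--         if i >= 3:
--             values = sorted([card_value(play_seq[j]) for j in range(i-3, i+1)])
--             if values[3] == values[2] + 1 == values[1] + 2 == values[0] + 3:
--                 score += 4
--         if i >= 4:
--             values = sorted([card_value(play_seq[j]) for j in range(i-4, i+1)])
--             if values[4] == values[3] + 1 == values[2] + 2 == values[1] + 3 == values[0] + 4: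
--                 score += 5
--     return score
-- ===== SOURCE B (Python) =====
-- def score_play_sequence2(play_seq, is_dealer):
--     vals = [min(c[0], 10) for c in play_seq]
--     n = len(vals)
--     # pass 1: 15s and 31s over running totals
--     fifteens = 0
--     t = 0
--     for v in vals:
--         t += v
--         if t == 15 or t == 31:
--             fifteens += 2
--     # pass 2: pairs via maximal runs of equal consecutive values (closed form per run)
--     pairs = 0
--     i = 0
--     while i < n:
--         j = i
--         while j < n and vals[j] == vals[i]:
--             j += 1
--         pairs += sum(2 * min(k, 3) for k in range(1, j - i))
--         i = j
--     # pass 3: runs, one pass per window width, enumerated by start index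
--     runs = 0
--     for w in (3, 4, 5):
--         for s in range(n - w + 1):
--             win = vals[s:s + w]
--             if len(set(win)) == w and max(win) - min(win) == w - 1:
--                 runs += w
--     return fifteens + pairs + runs
-- ===== Notes on version B (the rewrite author's own statement) =====
-- stated objective: alternative
-- what changed: A's single left-to-right loop threading one score is replaced by three independent staged passes: a running-total pass for 15/31, a pairs pass that walks maximal runs of equal consecutive values and adds a closed-form sum 2*min(k,3) per run, and a runs pass per window width 3/4/5 enumerated by window start index with a distinct-and-span test.
import Mathlib
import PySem

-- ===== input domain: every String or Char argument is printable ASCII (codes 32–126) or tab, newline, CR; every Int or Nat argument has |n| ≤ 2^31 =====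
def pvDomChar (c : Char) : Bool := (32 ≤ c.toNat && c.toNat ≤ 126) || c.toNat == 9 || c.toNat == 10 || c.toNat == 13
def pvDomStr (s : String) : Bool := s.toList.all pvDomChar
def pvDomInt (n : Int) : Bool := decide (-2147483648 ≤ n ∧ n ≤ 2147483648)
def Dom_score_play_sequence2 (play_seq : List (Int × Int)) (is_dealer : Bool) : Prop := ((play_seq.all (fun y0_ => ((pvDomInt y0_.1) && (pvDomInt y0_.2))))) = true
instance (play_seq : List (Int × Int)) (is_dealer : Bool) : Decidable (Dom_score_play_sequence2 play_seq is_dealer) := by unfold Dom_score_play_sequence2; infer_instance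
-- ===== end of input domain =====

-- B replaces A's single per-card scoring loop by three independent staged passes: a running-total
-- pass for 15/31, a pairs pass over maximal runs of equal consecutive values with a closed-form
-- per-run sum, and a runs pass per window width enumerated by window start index
-- (objective: alternative decomposition; same return value, no mutation in either version).

-- ===== PORT A =====
def pvCardValue (card : Int × Int) : Int := min card.1 10

-- one iteration of A's 'for i, card in enumerate(play_seq)' body; state = (score, total)
def pvStepA (ps : List (Int × Int)) (st : Int × Int) (ic : Int × (Int × Int)) : Int × Int :=
  let i := ic.1
  let card := ic.2
  let total := st.2 + pvCardValue card
  let score := st.1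
  let score := if total = 15 then score + 2 else if total = 31 then score + 2 else score
  let score :=
    if 1 ≤ i ∧ pvCardValue card = pvCardValue (PySem.List.pyGetD ps (i - 1) (0, 0)) then
      let score := score + 2
      if 2 ≤ i ∧ pvCardValue card = pvCardValue (PySem.List.pyGetD ps (i - 2) (0, 0)) then
        let score := score + 2
        if 3 ≤ i ∧ pvCardValue card = pvCardValue (PySem.List.pyGetD ps (i - 3) (0, 0)) then
          score + 2
        else score
      else score
    else score
  let score :=
    if 2 ≤ i then
      let values := PySem.List.sorted ((PySem.List.pyRange (i - 2) (i + 1)).map (fun j => pvCardValue (PySem.List.pyGetD ps j (0, 0)))) (fun x => x)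
      if PySem.List.pyGetD values 2 0 = PySem.List.pyGetD values 1 0 + 1 ∧
         PySem.List.pyGetD values 1 0 + 1 = PySem.List.pyGetD values 0 0 + 2 then
        score + 3
      else score
    else score
  let score :=
    if 3 ≤ i then
      let values := PySem.List.sorted ((PySem.List.pyRange (i - 3) (i + 1)).map (fun j => pvCardValue (PySem.List.pyGetD ps j (0, 0)))) (fun x => x)
      if PySem.List.pyGetD values 3 0 = PySem.List.pyGetD values 2 0 + 1 ∧
         PySem.List.pyGetD values 2 0 + 1 = PySem.List.pyGetD values 1 0 + 2 ∧
         PySem.List.pyGetD values 1 0 + 2 = PySem.List.pyGetD values 0 0 + 3 then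
        score + 4
      else score
    else score
  let score :=
    if 4 ≤ i then
      let values := PySem.List.sorted ((PySem.List.pyRange (i - 4) (i + 1)).map (fun j => pvCardValue (PySem.List.pyGetD ps j (0, 0)))) (fun x => x)
      if PySem.List.pyGetD values 4 0 = PySem.List.pyGetD values 3 0 + 1 ∧
         PySem.List.pyGetD values 3 0 + 1 = PySem.List.pyGetD values 2 0 + 2 ∧
         PySem.List.pyGetD values 2 0 + 2 = PySem.List.pyGetD values 1 0 + 3 ∧
         PySem.List.pyGetD values 1 0 + 3 = PySem.List.pyGetD values 0 0 + 4 then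
        score + 5
      else score
    else score
  (score, total)

def score_play_sequence2 (play_seq : List (Int × Int)) (is_dealer : Bool) : Int :=
  ((PySem.List.enumerate play_seq).foldl (fun st ic => pvStepA play_seq st ic) (0, 0)).1

-- ===== PORT B =====
-- B's 'len(set(win)) == w and max(win) - min(win) == w - 1' (win is nonempty whenever tested,
-- so Python's max/min never raise there; getD 0 is only a formal default)
def pvRunOK (win : List Int) (w : Nat) : Bool :=
  ((PySem.Set.ofList win).length == w) &&
  ((PySem.List.max? win (fun x => x)).getD 0 - (PySem.List.min? win (fun x => x)).getD 0 == (w : Int) - 1)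

-- pass 1: running totals, score 15s and 31s
def pvFifteens : List Int → Int → Int → Int
  | [], acc, _ => acc
  | v :: rest, acc, t =>
    pvFifteens rest (if t + v = 15 ∨ t + v = 31 then acc + 2 else acc) (t + v)

-- pass 2: the outer while advances group by group; the inner while scanning equal values is the
-- takeWhile/dropWhile split of the suffix
def pvPairs : List Int → Int
  | [] => 0
  | v :: rest =>
    ((PySem.List.pyRange 1 (((rest.takeWhile (fun x => x == v)).length + 1 : Nat) : Int)).map
        (fun k => 2 * min k 3)).sum
      + pvPairs (rest.dropWhile (fun x => x == v))
  termination_by l => l.length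
  decreasing_by simpa using Nat.lt_succ_of_le (List.length_dropWhile_le _ _)

-- pass 3: per width, windows by start index
def pvRuns (vals : List Int) : Int :=
  ([3, 4, 5] : List Nat).foldl (fun acc (w : Nat) =>
    (PySem.List.pyRange 0 ((vals.length : Int) - (w : Int) + 1)).foldl
      (fun acc2 s =>
        if pvRunOK (PySem.List.slice vals (some s) (some (s + (w : Int)))) w then acc2 + (w : Int)
        else acc2)
      acc) 0

def score_play_sequence2_alt (play_seq : List (Int × Int)) (is_dealer : Bool) : Int :=
  let vals := play_seq.map (fun c => min c.1 10)
  pvFifteens vals 0 0 + pvPairs vals + pvRuns vals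

-- ===== PRECONDITION & SPEC =====
def Spec_score_play_sequence2 (play_seq : List (Int × Int)) (is_dealer : Bool) (out : Int) : Prop := out = score_play_sequence2_alt play_seq is_dealer
instance (play_seq : List (Int × Int)) (is_dealer : Bool) (out : Int) : Decidable (Spec_score_play_sequence2 play_seq is_dealer out) := by unfold Spec_score_play_sequence2; infer_instance

-- ===== CLAIM (what is proved, stated in full; the proofs are below) =====
def Claim_equal_score_play_sequence2 : Prop := ∀ (play_seq : List (Int × Int)) (is_dealer : Bool), Dom_score_play_sequence2 play_seq is_dealer → Spec_score_play_sequence2 play_seq is_dealer (score_play_sequence2 play_seq is_dealer)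

-- ===== LEMMAS AND PROOFS =====

-- proof-only intermediate: capped backward match count (= length of the equal prefix, at most 3)
def pvMatchCount : List Int → Int → Nat → Nat
  | _, _, 0 => 0
  | [], _, _ + 1 => 0
  | e :: rest, v, f + 1 => if e = v then 1 + pvMatchCount rest v f else 0

-- proof-only intermediate program: A's loop re-expressed over the reversed prefix of card values
def pvGoB : List (Int × Int) → Int → Int → List Int → Int
  | [], score, _, _ => score
  | card :: rest, score, total, vals =>
    let v := min card.1 10
    let total' := total + v
    let score1 := if total' = 15 ∨ total' = 31 then score + 2 else score
    let score2 := score1 + 2 * (pvMatchCount vals v 3 : Int)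
    let vals' := v :: vals
    let score3 := [3, 4, 5].foldl
      (fun sc (w : Nat) =>
        if w ≤ vals'.length then
          if pvRunOK (vals'.take w) w then sc + (w : Int) else sc
        else sc) score2
    pvGoB rest score3 total' vals'

-- per-index pair contributions (prevRev = values seen so far, most recent first)
def pvSP : List Int → List Int → Int
  | [], _ => 0
  | v :: r, prevRev => 2 * (pvMatchCount prevRev v 3 : Int) + pvSP r (v :: prevRev)

-- per-index run-window contributions, one width
def pvSR (w : Nat) : List Int → List Int → Int
  | [], _ => 0
  | v :: r, prevRev =>
    (if w ≤ (v :: prevRev).length ∧ pvRunOK ((v :: prevRev).take w) w then (w : Int) else 0)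
      + pvSR w r (v :: prevRev)

-- per-index run-window contributions, all three widths
def pvSRall : List Int → List Int → Int
  | [], _ => 0
  | v :: r, prevRev =>
    (if 3 ≤ (v :: prevRev).length ∧ pvRunOK ((v :: prevRev).take 3) 3 then (3 : Int) else 0)
      + (if 4 ≤ (v :: prevRev).length ∧ pvRunOK ((v :: prevRev).take 4) 4 then (4 : Int) else 0)
      + (if 5 ≤ (v :: prevRev).length ∧ pvRunOK ((v :: prevRev).take 5) 5 then (5 : Int) else 0)
      + pvSRall r (v :: prevRev)

-- closed-form group sum: SS j k = Σ_{i=0}^{k-1} 2*min(j+i,3)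
def pvSS : Nat → Nat → Int
  | _, 0 => 0
  | j, k + 1 => 2 * ((min j 3 : Nat) : Int) + pvSS (j + 1) k

-- indexing into the fixed play list hits the prefix
lemma pv_pyGetD_append (xs ys : List (Int × Int)) (k : Nat) (d : Int × Int) (hk : k < xs.length) :
    PySem.List.pyGetD (xs ++ ys) (k : Int) d = xs.getD k d := by
  rw [PySem.List.pyGetD_natCast]
  simp [List.getD, List.getElem?_append_left hk]

-- reading backwards from position pre.length-1 is reading the reversed value list forwards
lemma pv_cv_rev (pre tail : List (Int × Int)) (k : Nat) (hk : k < pre.length) :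
    pvCardValue (PySem.List.pyGetD (pre ++ tail) ((pre.length : Int) - 1 - (k : Int)) (0, 0))
      = ((pre.map pvCardValue).reverse).getD k 0 := by
  have hj : ((pre.length : Int) - 1 - (k : Int)) = ((pre.length - 1 - k : Nat) : Int) := by omega
  have hjl : pre.length - 1 - k < pre.length := by omega
  rw [hj, pv_pyGetD_append _ _ _ _ hjl]
  rw [List.getD_eq_getElem _ _ hjl, List.getD_eq_getElem _ _ (by simpa using hk)]
  simp [List.getElem_reverse, List.getElem_map]

-- A's run window of width w, as a suffix of the mapped prefix
lemma pv_windowA (pre tail : List (Int × Int)) (card : Int × Int) (w : Nat) (a : Int)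
    (hw : 0 < w) (h : w ≤ pre.length + 1) (haw : a = (pre.length : Int) - ((w : Int) - 1)) :
    (PySem.List.pyRange a ((pre.length : Int) + 1)).map
        (fun j => pvCardValue (PySem.List.pyGetD (pre ++ card :: tail) j (0, 0)))
      = ((pre ++ [card]).map pvCardValue).drop (pre.length + 1 - w) := by
  subst haw
  have ha : (0:Int) ≤ (pre.length : Int) - ((w:Int) - 1) := by omega
  have hlen : ((pre.length : Int) + 1) = PySem.List.len (pre ++ [card]) := by
    simp [PySem.List.len]
  have hsplit : pre ++ card :: tail = (pre ++ [card]) ++ tail := by simp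
  calc (PySem.List.pyRange ((pre.length : Int) - ((w : Int) - 1)) ((pre.length : Int) + 1)).map
        (fun j => pvCardValue (PySem.List.pyGetD (pre ++ card :: tail) j (0, 0)))
      = (PySem.List.pyRange ((pre.length : Int) - ((w : Int) - 1)) ((pre.length : Int) + 1)).map
        (fun j => pvCardValue (PySem.List.pyGetD (pre ++ [card]) j (0, 0))) := by
        apply List.map_congr_left
        intro j hj
        rw [PySem.List.mem_pyRange_one] at hj
        have hj0 : j = ((j.toNat : Nat) : Int) := by omega
        rw [hsplit, hj0, pv_pyGetD_append _ _ _ _ (by simp; omega)]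
        rw [PySem.List.pyGetD_natCast]
    _ = (((PySem.List.pyRange ((pre.length : Int) - ((w : Int) - 1)) ((pre.length : Int) + 1)).map
        (fun j => PySem.List.pyGetD (pre ++ [card]) j (0, 0))).map pvCardValue) := by
        rw [List.map_map]; rfl
    _ = ((pre ++ [card]).drop (pre.length + 1 - w)).map pvCardValue := by
        rw [hlen, PySem.List.map_pyGetD_pyRange _ _ ha]
        have hidx : ((pre.length : Int) - ((w : Int) - 1)).toNat = pre.length + 1 - w := by omega
        rw [hidx]
    _ = ((pre ++ [card]).map pvCardValue).drop (pre.length + 1 - w) := by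
        rw [List.map_drop]

lemma pv_set_len_iff (t : List Int) : ((PySem.Set.ofList t).length = t.length) ↔ t.Nodup := by
  have hperm : (PySem.Set.ofList t).Perm t.dedup :=
    (List.perm_ext_iff_of_nodup (PySem.Set.nodup_ofList t) t.nodup_dedup).mpr
      (by simp [PySem.Set.mem_ofList])
  rw [hperm.length_eq]
  exact ⟨fun h => List.dedup_eq_self.mp ((List.dedup_sublist t).eq_of_length h),
         fun h => by rw [List.dedup_eq_self.mpr h]⟩

lemma pv_max_getD_eq {l : List Int} {m : Int} (hm : m ∈ l) (hmax : ∀ y ∈ l, y ≤ m) :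
    (PySem.List.max? l (fun x => x)).getD 0 = m := by
  cases h : PySem.List.max? l (fun x => x) with
  | none => exact absurd ((PySem.List.max?_eq_none_iff l _).mp h ▸ hm) (List.not_mem_nil)
  | some m' =>
    simpa using le_antisymm (hmax m' (PySem.List.max?_mem h)) (PySem.List.max?_isMax h m hm)

lemma pv_min_getD_eq {l : List Int} {m : Int} (hm : m ∈ l) (hmin : ∀ y ∈ l, m ≤ y) :
    (PySem.List.min? l (fun x => x)).getD 0 = m := by
  cases h : PySem.List.min? l (fun x => x) with
  | none => exact absurd ((PySem.List.min?_eq_none_iff l _).mp h ▸ hm) (List.not_mem_nil)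
  | some m' =>
    simpa using le_antisymm (PySem.List.min?_isMin h m hm) (hmin m' (PySem.List.min?_mem h))

-- A's sorted-consecutive test on a window is the distinct ∧ max−min test on the reversed window
lemma pv_run3 (l : List Int) (hl : l.length = 3) :
    (PySem.List.pyGetD (PySem.List.sorted l (fun x => x)) 2 0 = PySem.List.pyGetD (PySem.List.sorted l (fun x => x)) 1 0 + 1 ∧
     PySem.List.pyGetD (PySem.List.sorted l (fun x => x)) 1 0 + 1 = PySem.List.pyGetD (PySem.List.sorted l (fun x => x)) 0 0 + 2)
      ↔ pvRunOK l.reverse 3 = true := by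
  have hperm := PySem.List.sorted_perm l (fun x => x) false
  have hpair := PySem.List.sorted_pairwise l (fun x => x)
  have hlen : (PySem.List.sorted l (fun x => x)).length = 3 := by
    rw [PySem.List.length_sorted, hl]
  rcases hs : PySem.List.sorted l (fun x => x) with _ | ⟨a, _ | ⟨b, _ | ⟨c, _ | _⟩⟩⟩ <;>
    rw [hs] at hlen <;> simp at hlen
  rw [hs] at hperm hpair
  simp [List.pairwise_cons] at hpair
  obtain ⟨⟨hab, hac⟩, hbc⟩ := hpair
  have hmem : ∀ y, y ∈ l.reverse ↔ (y = a ∨ y = b ∨ y = c) := by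
    intro y; rw [List.mem_reverse, ← hperm.mem_iff]; simp
  have hmax : (PySem.List.max? l.reverse (fun x => x)).getD 0 = c :=
    pv_max_getD_eq ((hmem c).mpr (by simp)) (by intro y hy; rcases (hmem y).mp hy with h|h|h <;> omega)
  have hmin : (PySem.List.min? l.reverse (fun x => x)).getD 0 = a :=
    pv_min_getD_eq ((hmem a).mpr (by simp)) (by intro y hy; rcases (hmem y).mp hy with h|h|h <;> omega)
  have hnd : l.reverse.Nodup ↔ (a ≠ b ∧ a ≠ c ∧ b ≠ c) := by
    rw [(l.reverse_perm.trans hperm.symm).nodup_iff]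
    simp [List.nodup_cons, and_assoc]
  have hrl : l.reverse.length = 3 := by simp [hl]
  rw [pvRunOK, Bool.and_eq_true, beq_iff_eq, beq_iff_eq, ← hrl, pv_set_len_iff, hmax, hmin, hnd]
  show (c = b + 1 ∧ b + 1 = a + 2) ↔ _
  constructor
  · rintro ⟨h1, h2⟩
    exact ⟨⟨by omega, by omega, by omega⟩, by omega⟩
  · rintro ⟨⟨n1, n2, n3⟩, h4⟩
    omega

lemma pv_run4 (l : List Int) (hl : l.length = 4) :
    (PySem.List.pyGetD (PySem.List.sorted l (fun x => x)) 3 0 = PySem.List.pyGetD (PySem.List.sorted l (fun x => x)) 2 0 + 1 ∧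
     PySem.List.pyGetD (PySem.List.sorted l (fun x => x)) 2 0 + 1 = PySem.List.pyGetD (PySem.List.sorted l (fun x => x)) 1 0 + 2 ∧
     PySem.List.pyGetD (PySem.List.sorted l (fun x => x)) 1 0 + 2 = PySem.List.pyGetD (PySem.List.sorted l (fun x => x)) 0 0 + 3)
      ↔ pvRunOK l.reverse 4 = true := by
  have hperm := PySem.List.sorted_perm l (fun x => x) false
  have hpair := PySem.List.sorted_pairwise l (fun x => x)
  have hlen : (PySem.List.sorted l (fun x => x)).length = 4 := by
    rw [PySem.List.length_sorted, hl]
  rcases hs : PySem.List.sorted l (fun x => x) with _ | ⟨a, _ | ⟨b, _ | ⟨c, _ | ⟨d, _ | _⟩⟩⟩⟩ <;>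
    rw [hs] at hlen <;> simp at hlen
  rw [hs] at hperm hpair
  simp [List.pairwise_cons] at hpair
  obtain ⟨⟨hab, hac, had⟩, ⟨hbc, hbd⟩, hcd⟩ := hpair
  have hmem : ∀ y, y ∈ l.reverse ↔ (y = a ∨ y = b ∨ y = c ∨ y = d) := by
    intro y; rw [List.mem_reverse, ← hperm.mem_iff]; simp
  have hmax : (PySem.List.max? l.reverse (fun x => x)).getD 0 = d :=
    pv_max_getD_eq ((hmem d).mpr (by simp)) (by intro y hy; rcases (hmem y).mp hy with h|h|h|h <;> omega)
  have hmin : (PySem.List.min? l.reverse (fun x => x)).getD 0 = a :=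
    pv_min_getD_eq ((hmem a).mpr (by simp)) (by intro y hy; rcases (hmem y).mp hy with h|h|h|h <;> omega)
  have hnd : l.reverse.Nodup ↔ (a ≠ b ∧ a ≠ c ∧ a ≠ d ∧ b ≠ c ∧ b ≠ d ∧ c ≠ d) := by
    rw [(l.reverse_perm.trans hperm.symm).nodup_iff]
    simp [List.nodup_cons, and_assoc]
  have hrl : l.reverse.length = 4 := by simp [hl]
  rw [pvRunOK, Bool.and_eq_true, beq_iff_eq, beq_iff_eq, ← hrl, pv_set_len_iff, hmax, hmin, hnd]
  show (d = c + 1 ∧ c + 1 = b + 2 ∧ b + 2 = a + 3) ↔ _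
  constructor
  · rintro ⟨h1, h2, h3⟩
    exact ⟨⟨by omega, by omega, by omega, by omega, by omega, by omega⟩, by omega⟩
  · rintro ⟨⟨n1, n2, n3, n4, n5, n6⟩, h4⟩
    omega

lemma pv_run5 (l : List Int) (hl : l.length = 5) :
    (PySem.List.pyGetD (PySem.List.sorted l (fun x => x)) 4 0 = PySem.List.pyGetD (PySem.List.sorted l (fun x => x)) 3 0 + 1 ∧
     PySem.List.pyGetD (PySem.List.sorted l (fun x => x)) 3 0 + 1 = PySem.List.pyGetD (PySem.List.sorted l (fun x => x)) 2 0 + 2 ∧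
     PySem.List.pyGetD (PySem.List.sorted l (fun x => x)) 2 0 + 2 = PySem.List.pyGetD (PySem.List.sorted l (fun x => x)) 1 0 + 3 ∧
     PySem.List.pyGetD (PySem.List.sorted l (fun x => x)) 1 0 + 3 = PySem.List.pyGetD (PySem.List.sorted l (fun x => x)) 0 0 + 4)
      ↔ pvRunOK l.reverse 5 = true := by
  have hperm := PySem.List.sorted_perm l (fun x => x) false
  have hpair := PySem.List.sorted_pairwise l (fun x => x)
  have hlen : (PySem.List.sorted l (fun x => x)).length = 5 := by
    rw [PySem.List.length_sorted, hl]
  rcases hs : PySem.List.sorted l (fun x => x) with _ | ⟨a, _ | ⟨b, _ | ⟨c, _ | ⟨d, _ | ⟨e, _ | _⟩⟩⟩⟩⟩ <;>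
    rw [hs] at hlen <;> simp at hlen
  rw [hs] at hperm hpair
  simp [List.pairwise_cons] at hpair
  obtain ⟨⟨hab, hac, had, hae⟩, ⟨hbc, hbd, hbe⟩, ⟨hcd, hce⟩, hde⟩ := hpair
  have hmem : ∀ y, y ∈ l.reverse ↔ (y = a ∨ y = b ∨ y = c ∨ y = d ∨ y = e) := by
    intro y; rw [List.mem_reverse, ← hperm.mem_iff]; simp
  have hmax : (PySem.List.max? l.reverse (fun x => x)).getD 0 = e :=
    pv_max_getD_eq ((hmem e).mpr (by simp)) (by intro y hy; rcases (hmem y).mp hy with h|h|h|h|h <;> omega)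
  have hmin : (PySem.List.min? l.reverse (fun x => x)).getD 0 = a :=
    pv_min_getD_eq ((hmem a).mpr (by simp)) (by intro y hy; rcases (hmem y).mp hy with h|h|h|h|h <;> omega)
  have hnd : l.reverse.Nodup ↔ (a ≠ b ∧ a ≠ c ∧ a ≠ d ∧ a ≠ e ∧ b ≠ c ∧ b ≠ d ∧ b ≠ e ∧ c ≠ d ∧ c ≠ e ∧ d ≠ e) := by
    rw [(l.reverse_perm.trans hperm.symm).nodup_iff]
    simp [List.nodup_cons, and_assoc]
  have hrl : l.reverse.length = 5 := by simp [hl]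
  rw [pvRunOK, Bool.and_eq_true, beq_iff_eq, beq_iff_eq, ← hrl, pv_set_len_iff, hmax, hmin, hnd]
  show (e = d + 1 ∧ d + 1 = c + 2 ∧ c + 2 = b + 3 ∧ b + 3 = a + 4) ↔ _
  constructor
  · rintro ⟨h1, h2, h3, h4⟩
    refine ⟨⟨by omega, by omega, by omega, by omega, by omega, by omega, by omega, by omega, by omega, by omega⟩, by omega⟩
  · rintro ⟨⟨n1, n2, n3, n4, n5, n6, n7, n8, n9, n10⟩, h4⟩
    omega

lemma pv_1531 (t s : Int) :
    (if t = 15 then s + 2 else if t = 31 then s + 2 else s)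
      = (if t = 15 ∨ t = 31 then s + 2 else s) := by
  by_cases h1 : t = 15 <;> by_cases h2 : t = 31 <;> simp [h1, h2]

lemma pv_pairs_eq (pre tail : List (Int × Int)) (card : Int × Int) (s : Int) :
    (if 1 ≤ (pre.length : Int) ∧ pvCardValue card = pvCardValue (PySem.List.pyGetD (pre ++ card :: tail) ((pre.length : Int) - 1) (0, 0)) then
       if 2 ≤ (pre.length : Int) ∧ pvCardValue card = pvCardValue (PySem.List.pyGetD (pre ++ card :: tail) ((pre.length : Int) - 2) (0, 0)) then
         if 3 ≤ (pre.length : Int) ∧ pvCardValue card = pvCardValue (PySem.List.pyGetD (pre ++ card :: tail) ((pre.length : Int) - 3) (0, 0)) then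
           s + 2 + 2 + 2
         else s + 2 + 2
       else s + 2
     else s)
      = s + 2 * (pvMatchCount ((pre.map pvCardValue).reverse) (pvCardValue card) 3 : Int) := by
  have hlr : ((pre.map pvCardValue).reverse).length = pre.length := by simp
  rcases hr : (pre.map pvCardValue).reverse with _ | ⟨e1, r1⟩
  · have h0 : pre.length = 0 := by rw [← hlr, hr]; rfl
    simp [h0, pvMatchCount]
  · have hl1 : 1 ≤ pre.length := by rw [← hlr, hr]; simp
    have h1 : pvCardValue (PySem.List.pyGetD (pre ++ card :: tail) ((pre.length : Int) - 1) (0, 0)) = e1 := by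
      have h := pv_cv_rev pre (card :: tail) 0 (by omega)
      simp only [Nat.cast_zero, sub_zero, hr] at h
      simpa using h
    rw [h1]
    by_cases hv1 : pvCardValue card = e1
    · subst hv1
      rcases hr1 : r1 with _ | ⟨e2, r2⟩
      · have h0 : pre.length = 1 := by rw [← hlr, hr, hr1]; rfl
        simp [h0, pvMatchCount]
      · subst hr1
        have hl2 : 2 ≤ pre.length := by rw [← hlr, hr]; simp
        have h2 : pvCardValue (PySem.List.pyGetD (pre ++ card :: tail) ((pre.length : Int) - 2) (0, 0)) = e2 := by
          have h := pv_cv_rev pre (card :: tail) 1 (by omega)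
          simp only [Nat.cast_one, hr] at h
          rw [show (pre.length : Int) - 1 - 1 = (pre.length : Int) - 2 by ring] at h
          simpa using h
        rw [h2]
        by_cases hv2 : pvCardValue card = e2
        · subst hv2
          rcases hr2 : r2 with _ | ⟨e3, r3⟩
          · have h0 : pre.length = 2 := by rw [← hlr, hr, hr2]; rfl
            simp [h0, pvMatchCount]
            ring
          · subst hr2
            have hl3 : 3 ≤ pre.length := by
              rw [← hlr, hr]; simp
            have h3 : pvCardValue (PySem.List.pyGetD (pre ++ card :: tail) ((pre.length : Int) - 3) (0, 0)) = e3 := by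
              have h := pv_cv_rev pre (card :: tail) 2 (by omega)
              simp only [Nat.cast_two, hr] at h
              rw [show (pre.length : Int) - 1 - 2 = (pre.length : Int) - 3 by ring] at h
              simpa using h
            rw [h3]
            by_cases hv3 : pvCardValue card = e3
            · subst hv3
              simp [pvMatchCount,
                    show (1:Int) ≤ (pre.length : Int) by exact_mod_cast hl1,
                    show (2:Int) ≤ (pre.length : Int) by exact_mod_cast hl2,
                    show (3:Int) ≤ (pre.length : Int) by exact_mod_cast hl3]
              ring
            · simp [pvMatchCount, hv3, Ne.symm hv3,
                    show (1:Int) ≤ (pre.length : Int) by exact_mod_cast hl1,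
                    show (2:Int) ≤ (pre.length : Int) by exact_mod_cast hl2]
              ring
        · simp [pvMatchCount, hv2, Ne.symm hv2,
                show (1:Int) ≤ (pre.length : Int) by exact_mod_cast hl1]
    · simp [pvMatchCount, hv1, Ne.symm hv1]

lemma pv_runbranch3 (pre tail : List (Int × Int)) (card : Int × Int) (s : Int) :
    (if 2 ≤ (pre.length : Int) then
       if PySem.List.pyGetD (PySem.List.sorted ((PySem.List.pyRange ((pre.length : Int) - 2) ((pre.length : Int) + 1)).map (fun j => pvCardValue (PySem.List.pyGetD (pre ++ card :: tail) j (0, 0)))) (fun x => x)) 2 0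
            = PySem.List.pyGetD (PySem.List.sorted ((PySem.List.pyRange ((pre.length : Int) - 2) ((pre.length : Int) + 1)).map (fun j => pvCardValue (PySem.List.pyGetD (pre ++ card :: tail) j (0, 0)))) (fun x => x)) 1 0 + 1 ∧
          PySem.List.pyGetD (PySem.List.sorted ((PySem.List.pyRange ((pre.length : Int) - 2) ((pre.length : Int) + 1)).map (fun j => pvCardValue (PySem.List.pyGetD (pre ++ card :: tail) j (0, 0)))) (fun x => x)) 1 0 + 1
            = PySem.List.pyGetD (PySem.List.sorted ((PySem.List.pyRange ((pre.length : Int) - 2) ((pre.length : Int) + 1)).map (fun j => pvCardValue (PySem.List.pyGetD (pre ++ card :: tail) j (0, 0)))) (fun x => x)) 0 0 + 2 then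
         s + 3
       else s
     else s)
      = (if 3 ≤ (pvCardValue card :: (pre.map pvCardValue).reverse).length then
           if pvRunOK ((pvCardValue card :: (pre.map pvCardValue).reverse).take 3) 3 then s + 3 else s
         else s) := by
  by_cases hg : 3 ≤ pre.length + 1
  · have hwin := pv_windowA pre tail card 3 ((pre.length : Int) - 2) (by norm_num) (by omega) (by push_cast; ring)
    have hvals : pvCardValue card :: (pre.map pvCardValue).reverse = ((pre ++ [card]).map pvCardValue).reverse := by simp
    have hLlen : ((pre ++ [card]).map pvCardValue).length = pre.length + 1 := by simp
    have htake : (pvCardValue card :: (pre.map pvCardValue).reverse).take 3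
        = (((pre ++ [card]).map pvCardValue).drop (pre.length + 1 - 3)).reverse := by
      rw [hvals, List.take_reverse, hLlen]
    have hdlen : (((pre ++ [card]).map pvCardValue).drop (pre.length + 1 - 3)).length = 3 := by
      simp; omega
    rw [if_pos (show (2:Int) ≤ (pre.length : Int) by omega),
        if_pos (show 3 ≤ (pvCardValue card :: (pre.map pvCardValue).reverse).length by simp; omega),
        hwin, htake]
    exact if_congr (pv_run3 _ hdlen) rfl rfl
  · rw [if_neg (show ¬ (2:Int) ≤ (pre.length : Int) by omega),
        if_neg (show ¬ 3 ≤ (pvCardValue card :: (pre.map pvCardValue).reverse).length by simp; omega)]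

lemma pv_runbranch4 (pre tail : List (Int × Int)) (card : Int × Int) (s : Int) :
    (if 3 ≤ (pre.length : Int) then
       if PySem.List.pyGetD (PySem.List.sorted ((PySem.List.pyRange ((pre.length : Int) - 3) ((pre.length : Int) + 1)).map (fun j => pvCardValue (PySem.List.pyGetD (pre ++ card :: tail) j (0, 0)))) (fun x => x)) 3 0
            = PySem.List.pyGetD (PySem.List.sorted ((PySem.List.pyRange ((pre.length : Int) - 3) ((pre.length : Int) + 1)).map (fun j => pvCardValue (PySem.List.pyGetD (pre ++ card :: tail) j (0, 0)))) (fun x => x)) 2 0 + 1 ∧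
          PySem.List.pyGetD (PySem.List.sorted ((PySem.List.pyRange ((pre.length : Int) - 3) ((pre.length : Int) + 1)).map (fun j => pvCardValue (PySem.List.pyGetD (pre ++ card :: tail) j (0, 0)))) (fun x => x)) 2 0 + 1
            = PySem.List.pyGetD (PySem.List.sorted ((PySem.List.pyRange ((pre.length : Int) - 3) ((pre.length : Int) + 1)).map (fun j => pvCardValue (PySem.List.pyGetD (pre ++ card :: tail) j (0, 0)))) (fun x => x)) 1 0 + 2 ∧
          PySem.List.pyGetD (PySem.List.sorted ((PySem.List.pyRange ((pre.length : Int) - 3) ((pre.length : Int) + 1)).map (fun j => pvCardValue (PySem.List.pyGetD (pre ++ card :: tail) j (0, 0)))) (fun x => x)) 1 0 + 2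
            = PySem.List.pyGetD (PySem.List.sorted ((PySem.List.pyRange ((pre.length : Int) - 3) ((pre.length : Int) + 1)).map (fun j => pvCardValue (PySem.List.pyGetD (pre ++ card :: tail) j (0, 0)))) (fun x => x)) 0 0 + 3 then
         s + 4
       else s
     else s)
      = (if 4 ≤ (pvCardValue card :: (pre.map pvCardValue).reverse).length then
           if pvRunOK ((pvCardValue card :: (pre.map pvCardValue).reverse).take 4) 4 then s + 4 else s
         else s) := by
  by_cases hg : 4 ≤ pre.length + 1
  · have hwin := pv_windowA pre tail card 4 ((pre.length : Int) - 3) (by norm_num) (by omega) (by push_cast; ring)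
    have hvals : pvCardValue card :: (pre.map pvCardValue).reverse = ((pre ++ [card]).map pvCardValue).reverse := by simp
    have hLlen : ((pre ++ [card]).map pvCardValue).length = pre.length + 1 := by simp
    have htake : (pvCardValue card :: (pre.map pvCardValue).reverse).take 4
        = (((pre ++ [card]).map pvCardValue).drop (pre.length + 1 - 4)).reverse := by
      rw [hvals, List.take_reverse, hLlen]
    have hdlen : (((pre ++ [card]).map pvCardValue).drop (pre.length + 1 - 4)).length = 4 := by
      simp; omega
    rw [if_pos (show (3:Int) ≤ (pre.length : Int) by omega),
        if_pos (show 4 ≤ (pvCardValue card :: (pre.map pvCardValue).reverse).length by simp; omega),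
        hwin, htake]
    exact if_congr (pv_run4 _ hdlen) rfl rfl
  · rw [if_neg (show ¬ (3:Int) ≤ (pre.length : Int) by omega),
        if_neg (show ¬ 4 ≤ (pvCardValue card :: (pre.map pvCardValue).reverse).length by simp; omega)]

lemma pv_runbranch5 (pre tail : List (Int × Int)) (card : Int × Int) (s : Int) :
    (if 4 ≤ (pre.length : Int) then
       if PySem.List.pyGetD (PySem.List.sorted ((PySem.List.pyRange ((pre.length : Int) - 4) ((pre.length : Int) + 1)).map (fun j => pvCardValue (PySem.List.pyGetD (pre ++ card :: tail) j (0, 0)))) (fun x => x)) 4 0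
            = PySem.List.pyGetD (PySem.List.sorted ((PySem.List.pyRange ((pre.length : Int) - 4) ((pre.length : Int) + 1)).map (fun j => pvCardValue (PySem.List.pyGetD (pre ++ card :: tail) j (0, 0)))) (fun x => x)) 3 0 + 1 ∧
          PySem.List.pyGetD (PySem.List.sorted ((PySem.List.pyRange ((pre.length : Int) - 4) ((pre.length : Int) + 1)).map (fun j => pvCardValue (PySem.List.pyGetD (pre ++ card :: tail) j (0, 0)))) (fun x => x)) 3 0 + 1
            = PySem.List.pyGetD (PySem.List.sorted ((PySem.List.pyRange ((pre.length : Int) - 4) ((pre.length : Int) + 1)).map (fun j => pvCardValue (PySem.List.pyGetD (pre ++ card :: tail) j (0, 0)))) (fun x => x)) 2 0 + 2 ∧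
          PySem.List.pyGetD (PySem.List.sorted ((PySem.List.pyRange ((pre.length : Int) - 4) ((pre.length : Int) + 1)).map (fun j => pvCardValue (PySem.List.pyGetD (pre ++ card :: tail) j (0, 0)))) (fun x => x)) 2 0 + 2
            = PySem.List.pyGetD (PySem.List.sorted ((PySem.List.pyRange ((pre.length : Int) - 4) ((pre.length : Int) + 1)).map (fun j => pvCardValue (PySem.List.pyGetD (pre ++ card :: tail) j (0, 0)))) (fun x => x)) 1 0 + 3 ∧
          PySem.List.pyGetD (PySem.List.sorted ((PySem.List.pyRange ((pre.length : Int) - 4) ((pre.length : Int) + 1)).map (fun j => pvCardValue (PySem.List.pyGetD (pre ++ card :: tail) j (0, 0)))) (fun x => x)) 1 0 + 3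
            = PySem.List.pyGetD (PySem.List.sorted ((PySem.List.pyRange ((pre.length : Int) - 4) ((pre.length : Int) + 1)).map (fun j => pvCardValue (PySem.List.pyGetD (pre ++ card :: tail) j (0, 0)))) (fun x => x)) 0 0 + 4 then
         s + 5
       else s
     else s)
      = (if 5 ≤ (pvCardValue card :: (pre.map pvCardValue).reverse).length then
           if pvRunOK ((pvCardValue card :: (pre.map pvCardValue).reverse).take 5) 5 then s + 5 else s
         else s) := by
  by_cases hg : 5 ≤ pre.length + 1
  · have hwin := pv_windowA pre tail card 5 ((pre.length : Int) - 4) (by norm_num) (by omega) (by push_cast; ring)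
    have hvals : pvCardValue card :: (pre.map pvCardValue).reverse = ((pre ++ [card]).map pvCardValue).reverse := by simp
    have hLlen : ((pre ++ [card]).map pvCardValue).length = pre.length + 1 := by simp
    have htake : (pvCardValue card :: (pre.map pvCardValue).reverse).take 5
        = (((pre ++ [card]).map pvCardValue).drop (pre.length + 1 - 5)).reverse := by
      rw [hvals, List.take_reverse, hLlen]
    have hdlen : (((pre ++ [card]).map pvCardValue).drop (pre.length + 1 - 5)).length = 5 := by
      simp; omega
    rw [if_pos (show (4:Int) ≤ (pre.length : Int) by omega),
        if_pos (show 5 ≤ (pvCardValue card :: (pre.map pvCardValue).reverse).length by simp; omega),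
        hwin, htake]
    exact if_congr (pv_run5 _ hdlen) rfl rfl
  · rw [if_neg (show ¬ (4:Int) ≤ (pre.length : Int) by omega),
        if_neg (show ¬ 5 ≤ (pvCardValue card :: (pre.map pvCardValue).reverse).length by simp; omega)]

lemma pv_step_core (pre tail : List (Int × Int)) (card : Int × Int) (score total : Int) :
    pvStepA (pre ++ card :: tail) (score, total) ((pre.length : Int), card)
      = (([3, 4, 5] : List Nat).foldl
           (fun sc (w : Nat) =>
             if w ≤ (pvCardValue card :: (pre.map pvCardValue).reverse).length then
               if pvRunOK ((pvCardValue card :: (pre.map pvCardValue).reverse).take w) w then sc + (w : Int) else sc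
             else sc)
           ((if total + pvCardValue card = 15 ∨ total + pvCardValue card = 31 then score + 2 else score)
             + 2 * (pvMatchCount ((pre.map pvCardValue).reverse) (pvCardValue card) 3 : Int)),
         total + pvCardValue card) := by
  simp only [pvStepA, List.foldl_cons, List.foldl_nil, Nat.cast_ofNat]
  rw [Prod.mk.injEq]
  refine ⟨?_, rfl⟩
  rw [pv_1531, pv_pairs_eq, pv_runbranch3, pv_runbranch4, pv_runbranch5]

lemma pv_loop_eq : ∀ (rest pre : List (Int × Int)) (score total : Int),
    ((PySem.List.enumerate rest (pre.length : Int)).foldl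
        (fun st ic => pvStepA (pre ++ rest) st ic) (score, total)).1
      = pvGoB rest score total ((pre.map pvCardValue).reverse) := by
  intro rest
  induction rest with
  | nil => intro pre score total; simp [pvGoB, PySem.List.enumerate]
  | cons card rest' ih =>
    intro pre score total
    rw [PySem.List.enumerate_cons, List.foldl_cons]
    show ((PySem.List.enumerate rest' ((pre.length : Int) + 1)).foldl
        (fun st ic => pvStepA (pre ++ card :: rest') st ic)
        (pvStepA (pre ++ card :: rest') (score, total) ((pre.length : Int), card))).1 = _
    rw [pv_step_core pre rest' card score total]
    have hcv : min card.1 10 = pvCardValue card := rfl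
    have h1 : pre ++ card :: rest' = (pre ++ [card]) ++ rest' := by simp
    have h2 : ((pre.length : Int) + 1) = (((pre ++ [card]).length : Nat) : Int) := by simp
    have h3 : pvCardValue card :: (pre.map pvCardValue).reverse
        = ((pre ++ [card]).map pvCardValue).reverse := by simp
    simp only [pvGoB, hcv, h1, h2, h3]
    exact ih (pre ++ [card]) _ _

-- ---- decomposition of pvGoB into the three staged sums ----

lemma pv_if_if_add (c1 c2 : Prop) [Decidable c1] [Decidable c2] (x w : Int) :
    (if c1 then (if c2 then x + w else x) else x) = x + (if c1 ∧ c2 then w else 0) := by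
  split_ifs <;> simp_all

lemma pv_fifteens_add : ∀ (l : List Int) (a t : Int),
    pvFifteens l a t = a + pvFifteens l 0 t := by
  intro l
  induction l with
  | nil => intro a t; simp [pvFifteens]
  | cons v r ih =>
    intro a t
    simp only [pvFifteens]
    split_ifs with h
    · rw [ih (a + 2) (t + v), ih (0 + 2) (t + v)]; ring
    · exact ih a (t + v)

lemma pv_goB_split : ∀ (l : List (Int × Int)) (s t : Int) (prevRev : List Int),
    pvGoB l s t prevRev
      = s + pvFifteens (l.map pvCardValue) 0 t + pvSP (l.map pvCardValue) prevRev
          + pvSRall (l.map pvCardValue) prevRev := by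
  intro l
  induction l with
  | nil => intro s t prevRev; simp [pvGoB, pvFifteens, pvSP, pvSRall]
  | cons card r ih =>
    intro s t prevRev
    have hcv : min card.1 10 = pvCardValue card := rfl
    simp only [pvGoB, hcv, List.foldl_cons, List.foldl_nil]
    rw [pv_if_if_add, pv_if_if_add, pv_if_if_add, ih]
    simp only [List.map_cons, pvSP, pvSRall, pvFifteens]
    rw [pv_fifteens_add (r.map pvCardValue)
        (if t + pvCardValue card = 15 ∨ t + pvCardValue card = 31 then (0:Int) + 2 else 0)
        (t + pvCardValue card)]
    split_ifs with h <;> ring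

-- ---- pass 1 equals the 15/31 contributions (definitionally shared) ----

-- ---- pass 2: pairs ----

lemma pv_mc_replicate : ∀ (j : Nat) (f : Nat) (t0 : List Int) (v : Int),
    (∀ u, t0.head? = some u → u ≠ v) →
    pvMatchCount (List.replicate j v ++ t0) v f = min j f := by
  intro j
  induction j with
  | zero =>
    intro f t0 v h
    cases f with
    | zero => simp [pvMatchCount]
    | succ f' =>
      cases t0 with
      | nil => simp [pvMatchCount]
      | cons u t =>
        have : u ≠ v := h u rfl
        simp [pvMatchCount, this]
  | succ j' ih =>
    intro f t0 v h
    cases f with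
    | zero => simp [pvMatchCount]
    | succ f' =>
      simp only [List.replicate_succ, List.cons_append, pvMatchCount]
      rw [if_pos trivial, ih f' t0 v h]
      omega

lemma pv_sp_chunk : ∀ (k j : Nat) (t0 rest : List Int) (v : Int),
    (∀ u, t0.head? = some u → u ≠ v) →
    pvSP (List.replicate k v ++ rest) (List.replicate j v ++ t0)
      = pvSS j k + pvSP rest (List.replicate (j + k) v ++ t0) := by
  intro k
  induction k with
  | zero => intro j t0 rest v h; simp [pvSS]
  | succ k' ih =>
    intro j t0 rest v h
    simp only [List.replicate_succ, List.cons_append, pvSP, pvSS]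
    rw [pv_mc_replicate j 3 t0 v h]
    have hrep : (v :: (List.replicate j v ++ t0)) = List.replicate (j + 1) v ++ t0 := by
      rw [← List.cons_append, ← List.replicate_succ]
    rw [hrep, ih (j + 1) t0 rest v h]
    have hj : j + (k' + 1) = j + 1 + k' := by omega
    rw [hj]
    ring

lemma pv_ss_pyRange : ∀ (k j : Nat),
    pvSS j k = ((PySem.List.pyRange (j : Int) ((j : Int) + (k : Int))).map (fun x => 2 * min x 3)).sum := by
  intro k
  induction k with
  | zero => intro j; simp [pvSS, PySem.List.pyRange_one_eq_nil]
  | succ k' ih =>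
    intro j
    rw [PySem.List.pyRange_one_cons (by push_cast; omega)]
    simp only [List.map_cons, List.sum_cons, pvSS]
    have h1 : ((j : Int) + 1) = ((j + 1 : Nat) : Int) := by push_cast; ring
    have h2 : ((j : Int) + ((k' + 1 : Nat) : Int)) = (((j + 1 : Nat) : Int) + ((k' : Nat) : Int)) := by push_cast; ring
    rw [h2, h1, ← ih (j + 1)]
    have h3 : ((min j 3 : Nat) : Int) = min (j : Int) 3 := by
      rcases Nat.le_total j 3 with h | h <;> simp [Nat.min_def, Int.min_def] <;> omega
    rw [h3]

lemma pv_ss_head (L : Nat) :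
    pvSS 0 (L + 1)
      = ((PySem.List.pyRange 1 ((L + 1 : Nat) : Int)).map (fun k => 2 * min k 3)).sum := by
  rw [pv_ss_pyRange]
  rw [show ((0 : Nat) : Int) + ((L + 1 : Nat) : Int) = ((L + 1 : Nat) : Int) by push_cast; ring]
  rw [show ((0 : Nat) : Int) = (0 : Int) by norm_num]
  rw [PySem.List.pyRange_one_cons (by push_cast; omega)]
  simp

lemma pv_takeWhile_replicate (r : List Int) (v : Int) :
    r.takeWhile (fun x => x == v) = List.replicate (r.takeWhile (fun x => x == v)).length v := by
  apply List.eq_replicate_of_mem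
  intro b hb
  simpa using (List.mem_takeWhile_imp hb)

lemma pv_dropWhile_head (r : List Int) (v : Int) :
    ∀ u, (r.dropWhile (fun x => x == v)).head? = some u → u ≠ v := by
  induction r with
  | nil => intro u h; simp [List.dropWhile] at h
  | cons a t ih =>
    intro u h
    rw [List.dropWhile_cons] at h
    by_cases ha : a = v
    · exact ih u (by simpa [ha] using h)
    · simp [ha] at h; omega

lemma pv_pairs_main : ∀ (n : Nat) (l t0 : List Int),
    l.length ≤ n →
    (∀ v u, l.head? = some v → t0.head? = some u → u ≠ v) →
    pvSP l t0 = pvPairs l := by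
  intro n
  induction n with
  | zero =>
    intro l t0 hl _
    have : l = [] := List.eq_nil_of_length_eq_zero (by omega)
    subst this; simp [pvSP, pvPairs]
  | succ n' ih =>
    intro l t0 hl hh
    cases l with
    | nil => simp [pvSP, pvPairs]
    | cons v r =>
      have hsplit : v :: r
          = List.replicate ((r.takeWhile (fun x => x == v)).length + 1) v
              ++ r.dropWhile (fun x => x == v) := by
        rw [List.replicate_succ, List.cons_append]
        congr 1
        conv_lhs => rw [← List.takeWhile_append_dropWhile (p := fun x => x == v) (l := r)]
        exact congrArg (fun z => z ++ r.dropWhile (fun x => x == v)) (pv_takeWhile_replicate r v)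
      have hne : ∀ u, t0.head? = some u → u ≠ v := fun u hu => hh v u rfl hu
      have h1 := pv_sp_chunk ((r.takeWhile (fun x => x == v)).length + 1) 0 t0
        (r.dropWhile (fun x => x == v)) v hne
      simp only [List.replicate_zero, List.nil_append, Nat.zero_add] at h1
      conv_lhs => rw [hsplit]
      rw [h1]
      have hlen : (r.dropWhile (fun x => x == v)).length ≤ n' :=
        le_trans (List.length_dropWhile_le _ _) (by simpa using Nat.le_of_succ_le_succ hl)
      have hcond : ∀ v' u, (r.dropWhile (fun x => x == v)).head? = some v' →
          (List.replicate ((r.takeWhile (fun x => x == v)).length + 1) v ++ t0).head? = some u →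
          u ≠ v' := by
        intro v' u hv' hu
        have hv'v : v' ≠ v := pv_dropWhile_head r v v' hv'
        have hhd : (List.replicate ((r.takeWhile (fun x => x == v)).length + 1) v ++ t0).head?
            = some v := by
          rw [List.replicate_succ, List.cons_append, List.head?_cons]
        rw [hhd] at hu
        cases hu
        exact Ne.symm hv'v
      rw [ih (r.dropWhile (fun x => x == v)) _ hlen hcond]
      conv_rhs => rw [pvPairs]
      rw [pv_ss_head]

-- ---- pass 3: runs ----

lemma pv_runOK_reverse (l : List Int) (w : Nat) : pvRunOK l.reverse w = pvRunOK l w := by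
  unfold pvRunOK
  have hset : (PySem.Set.ofList l.reverse).length = (PySem.Set.ofList l).length := by
    have hperm : (PySem.Set.ofList l.reverse).Perm (PySem.Set.ofList l) :=
      (List.perm_ext_iff_of_nodup (PySem.Set.nodup_ofList _) (PySem.Set.nodup_ofList _)).mpr
        (by simp [PySem.Set.mem_ofList])
    exact hperm.length_eq
  rw [hset]
  congr 1
  cases l with
  | nil => simp
  | cons a t =>
    obtain ⟨m, hm⟩ : ∃ m, PySem.List.max? (a :: t) (fun x => x) = some m := by
      cases h : PySem.List.max? (a :: t) (fun x => x) with
      | none => exact absurd ((PySem.List.max?_eq_none_iff _ _).mp h) (by simp)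
      | some m => exact ⟨m, rfl⟩
    obtain ⟨m', hm'⟩ : ∃ m', PySem.List.min? (a :: t) (fun x => x) = some m' := by
      cases h : PySem.List.min? (a :: t) (fun x => x) with
      | none => exact absurd ((PySem.List.min?_eq_none_iff _ _).mp h) (by simp)
      | some m => exact ⟨m, rfl⟩
    have hmaxr : (PySem.List.max? (a :: t).reverse (fun x => x)).getD 0 = m :=
      pv_max_getD_eq (List.mem_reverse.mpr (PySem.List.max?_mem hm))
        (fun y hy => PySem.List.max?_isMax hm y (List.mem_reverse.mp hy))
    have hminr : (PySem.List.min? (a :: t).reverse (fun x => x)).getD 0 = m' :=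
      pv_min_getD_eq (List.mem_reverse.mpr (PySem.List.min?_mem hm'))
        (fun y hy => PySem.List.min?_isMin hm' y (List.mem_reverse.mp hy))
    rw [hmaxr, hminr, hm, hm']
    simp

lemma pv_sum_range_shift (f : Nat → Int) (k : Nat) (h0 : ∀ i, i < k → f i = 0) :
    ∀ n, ((List.range n).map f).sum = ((List.range (n - k)).map (fun s => f (s + k))).sum := by
  intro n
  induction n with
  | zero => simp
  | succ m ih =>
    by_cases hmk : m + 1 ≤ k
    · have h1 : m + 1 - k = 0 := by omega
      rw [h1]
      simp only [List.range_succ, List.map_append, List.sum_append, ih]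
      have h2 : m - k = 0 := by omega
      rw [h2]
      simp [h0 m (by omega)]
    · have h1 : m + 1 - k = (m - k) + 1 := by omega
      rw [h1]
      simp only [List.range_succ, List.map_append, List.sum_append, ih]
      have h2 : m - k + k = m := by omega
      simp [h2]

lemma pv_srw_main (w : Nat) : ∀ (rest pre : List Int),
    pvSR w rest pre.reverse
      = ((List.range rest.length).map (fun k =>
          if w ≤ pre.length + k + 1 ∧
             pvRunOK (((pre ++ rest).take (pre.length + k + 1)).drop (pre.length + k + 1 - w)) w = true
          then (w : Int) else 0)).sum := by
  intro rest
  induction rest with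
  | nil => intro pre; simp [pvSR]
  | cons v r ih =>
    intro pre
    simp only [pvSR, List.length_cons]
    rw [List.range_succ_eq_map, List.map_cons, List.sum_cons, List.map_map]
    congr 1
    · show (if w ≤ pre.reverse.length + 1 ∧ pvRunOK ((v :: pre.reverse).take w) w = true then (w : Int) else 0)
        = (if w ≤ pre.length + 0 + 1 ∧
             pvRunOK (((pre ++ v :: r).take (pre.length + 0 + 1)).drop (pre.length + 0 + 1 - w)) w = true
           then (w : Int) else 0)
      by_cases hg : w ≤ pre.length + 1
      · have htake1 : (pre ++ v :: r).take (pre.length + 0 + 1) = pre ++ [v] := by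
          rw [show pre.length + 0 + 1 = (pre ++ [v]).length by simp]
          rw [show pre ++ v :: r = (pre ++ [v]) ++ r by simp]
          exact List.take_left
        have hwin : (v :: pre.reverse).take w = ((pre ++ [v]).drop (pre.length + 1 - w)).reverse := by
          rw [show v :: pre.reverse = (pre ++ [v]).reverse by simp, List.take_reverse]
          simp
        rw [htake1, hwin, pv_runOK_reverse]
        rw [show pre.length + 0 + 1 - w = pre.length + 1 - w by omega]
        have hg2 : w ≤ pre.reverse.length + 1 := by simpa using hg
        simp [hg, hg2]
      · rw [if_neg (by simp; omega), if_neg (by omega)]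
    · rw [show pvSR w r (v :: pre.reverse) = pvSR w r ((pre ++ [v]).reverse) from
          congrArg (pvSR w r) (by simp)]
      rw [ih (pre ++ [v])]
      congr 1
      apply List.map_congr_left
      intro k _
      simp only [Function.comp]
      rw [show (pre ++ [v]) ++ r = pre ++ v :: r by simp]
      rw [show (pre ++ [v]).length = pre.length + 1 by simp]
      rw [show pre.length + 1 + k + 1 = pre.length + Nat.succ k + 1 by omega]

lemma pv_srw_sum (w : Nat) (hw : 1 ≤ w) (vals : List Int) :
    pvSR w vals [] = ((List.range (vals.length + 1 - w)).map
      (fun s => if pvRunOK ((vals.drop s).take w) w = true then (w : Int) else 0)).sum := by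
  have h := pv_srw_main w vals []
  simp only [List.reverse_nil, List.length_nil, List.nil_append, Nat.zero_add] at h
  rw [h]
  rw [pv_sum_range_shift _ (w - 1) (by intro i hi; rw [if_neg]; push_neg; intro hle; omega)]
  rw [show vals.length - (w - 1) = vals.length + 1 - w by omega]
  congr 1
  apply List.map_congr_left
  intro s hs
  have hsn : s < vals.length + 1 - w := by simpa using hs
  have h1 : s + (w - 1) + 1 = s + w := by omega
  have h2 : s + w - w = s := by omega
  rw [h1, h2]
  rw [show (vals.take (s + w)).drop s = (vals.drop s).take w by
    rw [List.drop_take]; congr 1; omega]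
  simp [show w ≤ s + w by omega]

lemma pv_inner_w (vals : List Int) (w : Nat) (acc : Int) :
    (PySem.List.pyRange 0 ((vals.length : Int) - (w : Int) + 1)).foldl
      (fun acc2 s =>
        if pvRunOK (PySem.List.slice vals (some s) (some (s + (w : Int)))) w then acc2 + (w : Int)
        else acc2) acc
      = acc + ((List.range (vals.length + 1 - w)).map
          (fun s => if pvRunOK ((vals.drop s).take w) w = true then (w : Int) else 0)).sum := by
  by_cases hM : (vals.length : Int) - (w : Int) + 1 ≤ 0
  · rw [PySem.List.pyRange_one_eq_nil (by omega)]
    rw [show vals.length + 1 - w = 0 by omega]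
    simp
  · have hM2 : (vals.length : Int) - (w : Int) + 1 = ((vals.length + 1 - w : Nat) : Int) := by omega
    rw [hM2, PySem.List.pyRange_zero_natCast, List.foldl_map]
    have hbody : (fun (acc2 : Int) (s : Nat) =>
          if pvRunOK (PySem.List.slice vals (some ((s : Nat) : Int)) (some (((s : Nat) : Int) + ((w : Nat) : Int)))) w
          then acc2 + (w : Int) else acc2)
        = fun (acc2 : Int) (s : Nat) =>
            acc2 + (if pvRunOK ((vals.drop s).take w) w = true then (w : Int) else 0) := by
      funext acc2 s
      rw [PySem.List.slice_natCast_add]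
      split_ifs <;> simp_all
    rw [hbody, PySem.List.foldl_add]

lemma pv_sr_split : ∀ (l prevRev : List Int),
    pvSRall l prevRev = pvSR 3 l prevRev + pvSR 4 l prevRev + pvSR 5 l prevRev := by
  intro l
  induction l with
  | nil => intro prevRev; simp [pvSRall, pvSR]
  | cons v r ih =>
    intro prevRev
    simp only [pvSRall, pvSR]
    rw [ih]
    ring

lemma pv_runs_eq (vals : List Int) :
    pvSRall vals [] = pvRuns vals := by
  rw [pv_sr_split]
  unfold pvRuns
  simp only [List.foldl_cons, List.foldl_nil]
  rw [pv_inner_w, pv_inner_w, pv_inner_w]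
  rw [pv_srw_sum 3 (by norm_num) vals, pv_srw_sum 4 (by norm_num) vals, pv_srw_sum 5 (by norm_num) vals]
  ring

-- ===== VERDICT (by name: the statement is the Claim_ definition above) =====
theorem score_play_sequence2_spec : Claim_equal_score_play_sequence2 := by
  intro play_seq is_dealer _
  show _ = _
  unfold score_play_sequence2 score_play_sequence2_alt
  have hA : ((PySem.List.enumerate play_seq).foldl (fun st ic => pvStepA play_seq st ic) (0, 0)).1
      = pvGoB play_seq 0 0 [] := by
    have := pv_loop_eq play_seq [] 0 0
    simpa using this
  rw [hA, pv_goB_split]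
  have hmap : play_seq.map (fun c => min c.1 10) = play_seq.map pvCardValue := rfl
  rw [hmap]
  rw [pv_pairs_main (play_seq.map pvCardValue).length (play_seq.map pvCardValue) [] le_rfl
        (by intro v u _ hu; simp at hu)]
  rw [pv_runs_eq]
  ring
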